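-- pv_equiv track=rewrite | github.com/BuiThiThanhTrang/BioinformaticsCoursera | Course_2_17_Implement_CyclopeptideSequencing/Course_2_17_Implement_CyclopeptideSequencing.py | Consistent
-- ===== SOURCE A (Python) =====
-- from collections import Counter
--
-- def linear_spectrum(peptide):
--     prefix_mass = [0]
--     for m in peptide:
--         prefix_mass.append(prefix_mass[-1] + AminoAcidMass[m])
--     spectrum = [0]
--     for i in range(len(peptide)):
--         for j in range(i+1, len(peptide)+1):
--             spectrum.append(prefix_mass[j] - prefix_mass[i])
--     return sorted(spectrum)
--
-- def Consistent(peptide, spectrum):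
--     peptide_spectrum = linear_spectrum(peptide)
--     peptide_counter = Counter(peptide_spectrum)
--     spectrum_counter = Counter(spectrum)
--     for mass in peptide_counter:
--         if peptide_counter[mass] > spectrum_counter[mass]:
--             return False
--     return True
--
-- AminoAcidMass = {'G': 57, 'A': 71, 'S': 87, 'P': 97, 'V': 99, 'T': 101, 'C': 103, 'I': 113,
--                  'L': 113, 'N': 114, 'D': 115, 'K': 128, 'Q': 128, 'E': 129, 'M': 131,
--                  'H': 137, 'F': 147, 'R': 156, 'Y': 163, 'W': 186}
-- ===== SOURCE B (Python) =====
-- from collections import Counter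
--
-- AminoAcidMass = {'G': 57, 'A': 71, 'S': 87, 'P': 97, 'V': 99, 'T': 101, 'C': 103, 'I': 113,
--                  'L': 113, 'N': 114, 'D': 115, 'K': 128, 'Q': 128, 'E': 129, 'M': 131,
--                  'H': 137, 'F': 147, 'R': 156, 'Y': 163, 'W': 186}
--
-- def Consistent(peptide, spectrum):
--     masses = [AminoAcidMass[c] for c in peptide]
--     sub = [0]
--     for i in range(len(masses)):
--         run = 0
--         for j in range(i, len(masses)):
--             run += masses[j]
--             sub.append(run)
--     return not (Counter(sub) - Counter(spectrum))
-- ===== Notes on version B (the rewrite author's own statement) =====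
-- stated objective: alternative
-- what changed: B drops A's prefix-mass table and sorting: it generates subpeptide masses by per-start running window sums and decides containment by Counter-subtraction emptiness instead of iterating keys over a counter of the sorted spectrum.
import Mathlib
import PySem

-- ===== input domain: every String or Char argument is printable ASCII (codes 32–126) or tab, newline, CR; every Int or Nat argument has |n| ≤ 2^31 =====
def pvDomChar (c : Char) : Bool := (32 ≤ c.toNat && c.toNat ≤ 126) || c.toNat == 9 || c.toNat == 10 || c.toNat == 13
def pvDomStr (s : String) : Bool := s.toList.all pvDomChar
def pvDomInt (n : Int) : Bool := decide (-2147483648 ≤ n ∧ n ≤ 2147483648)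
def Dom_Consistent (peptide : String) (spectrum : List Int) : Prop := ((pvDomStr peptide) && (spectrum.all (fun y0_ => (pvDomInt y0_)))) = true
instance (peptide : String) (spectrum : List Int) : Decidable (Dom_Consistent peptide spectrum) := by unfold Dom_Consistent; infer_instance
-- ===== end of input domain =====

-- B replaces A's prefix-mass table with per-start running window sums and the key loop
-- with a Counter-subtraction emptiness test (objective: alternative decomposition, same cost class).

-- ===== PORT A =====
def AminoAcidMass : PySem.Dict Char Int := PySem.Dict.ofList
  [('G',57),('A',71),('S',87),('P',97),('V',99),('T',101),('C',103),('I',113),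
   ('L',113),('N',114),('D',115),('K',128),('Q',128),('E',129),('M',131),
   ('H',137),('F',147),('R',156),('Y',163),('W',186)]

-- AminoAcidMass[m] raises KeyError on residues outside the table: Pre_ excludes those,
-- so the total .getD m 0 is exact on Pre_.
def linear_spectrum (peptide : String) : List Int :=
  let prefix_mass := peptide.toList.foldl
    (fun pm m => pm ++ [PySem.List.pyGetD pm (-1) 0 + AminoAcidMass.getD m 0]) [0]
  let spectrum := (PySem.List.pyRange 0 (PySem.Str.len peptide)).foldl
    (fun sp i => (PySem.List.pyRange (i+1) (PySem.Str.len peptide + 1)).foldl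
      (fun sp j => sp ++ [PySem.List.pyGetD prefix_mass j 0 - PySem.List.pyGetD prefix_mass i 0]) sp)
    [0]
  PySem.List.sorted spectrum (fun x => x) false

def Consistent (peptide : String) (spectrum : List Int) : Bool :=
  let peptide_spectrum := linear_spectrum peptide
  let peptide_counter := PySem.Dict.counter peptide_spectrum
  let spectrum_counter := PySem.Dict.counter spectrum
  -- 'for mass in peptide_counter: if …: return False' / 'return True' as an all-loop
  peptide_counter.keys.all
    (fun mass => !(decide (spectrum_counter.getD mass 0 < peptide_counter.getD mass 0)))

-- ===== PORT B =====
def Consistent_alt (peptide : String) (spectrum : List Int) : Bool :=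
  let masses := peptide.toList.map (fun c => AminoAcidMass.getD c 0)  -- KeyError outside Pre_
  let sub := (PySem.List.pyRange 0 (PySem.List.len masses)).foldl
    (fun sb i =>
      ((PySem.List.pyRange i (PySem.List.len masses)).foldl
        (fun (p : List Int × Int) j =>
          let run := p.2 + PySem.List.pyGetD masses j 0
          (p.1 ++ [run], run)) (sb, 0)).1)
    [0]
  let sub_counter := PySem.Dict.counter sub
  let spectrum_counter := PySem.Dict.counter spectrum
  -- Counter.__sub__ keeps positive differences; its loop over the right operand's items
  -- never adds anything here since list counters have no negative counts.
  let diff := sub_counter.items.foldl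
    (fun (d : PySem.Dict Int Int) kv =>
      let nd := kv.2 - spectrum_counter.getD kv.1 0
      if 0 < nd then d.insert kv.1 nd else d)
    PySem.Dict.empty
  decide (diff.items = [])  -- not diff

-- ===== PRECONDITION & SPEC =====
-- Pre_ excludes peptides containing a character outside the amino-acid table, on which
-- Python A (and B) raise KeyError.
def Pre_Consistent (peptide : String) (spectrum : List Int) : Prop :=
  (peptide.toList.all (fun c =>
    ['G','A','S','P','V','T','C','I','L','N','D','K','Q','E','M','H','F','R','Y','W'].contains c)) = true
instance (peptide : String) (spectrum : List Int) : Decidable (Pre_Consistent peptide spectrum) := by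
  unfold Pre_Consistent; infer_instance
def pvWitness_Consistent : String × List Int := ("GA", [57, 71, 128])

def Spec_Consistent (peptide : String) (spectrum : List Int) (out : Bool) : Prop := out = Consistent_alt peptide spectrum
instance (peptide : String) (spectrum : List Int) (out : Bool) : Decidable (Spec_Consistent peptide spectrum out) := by unfold Spec_Consistent; infer_instance

-- ===== CLAIM (what is proved, stated in full; the proofs are below) =====
def Claim_equal_Consistent : Prop := ∀ (peptide : String) (spectrum : List Int), Dom_Consistent peptide spectrum → Pre_Consistent peptide spectrum → Spec_Consistent peptide spectrum (Consistent peptide spectrum)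

-- ===== LEMMAS AND PROOFS =====

-- running-sum list of B's inner loop, starting from r
def runL (g : Int → Int) (r : Int) : List Int → List Int
  | [] => []
  | j :: js => (r + g j) :: runL g (r + g j) js

-- A's prefix_mass list, characterised
def preList (M : List Int) : List Int :=
  (List.range (M.length + 1)).map (fun t => (M.take t).sum)

lemma prefix_foldl {α : Type} (w : α → Int) (cs : List α) (acc : List Int) (x : Int) :
    cs.foldl (fun pm m => pm ++ [PySem.List.pyGetD pm (-1) 0 + w m]) (acc ++ [x])
      = acc ++ [x] ++ (List.range cs.length).map (fun k => x + ((cs.map w).take (k+1)).sum) := by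
  induction cs generalizing acc x with
  | nil => simp
  | cons m ms ih =>
    simp only [List.foldl_cons, PySem.List.pyGetD_neg_one_append_singleton]
    rw [show acc ++ [x] ++ [x + w m] = (acc ++ [x]) ++ [x + w m] by simp,
        ih (acc ++ [x]) (x + w m)]
    simp only [List.length_cons, List.range_succ_eq_map, List.map_cons, List.map_map,
      List.take_succ_cons, List.sum_cons, List.append_assoc, List.cons_append, List.nil_append]
    simp only [List.take_zero, List.sum_nil, add_zero, Function.comp_def]
    refine congrArg _ (congrArg _ (congrArg _ ?_))
    apply List.map_congr_left
    intro k _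
    ring

lemma prefix_eq (w : Char → Int) (cs : List Char) :
    cs.foldl (fun pm m => pm ++ [PySem.List.pyGetD pm (-1) 0 + w m]) [0]
      = preList (cs.map w) := by
  have h := prefix_foldl w cs [] 0
  simp only [List.nil_append] at h
  rw [h, preList]
  simp only [List.length_map, List.range_succ_eq_map, List.map_cons, List.map_map,
    List.take_zero, List.sum_nil, List.cons_append, List.nil_append]
  refine congrArg _ ?_
  apply List.map_congr_left
  intro k _
  simp

lemma preD (M : List Int) (k : Nat) (hk : k ≤ M.length) :
    PySem.List.pyGetD (preList M) (k : Int) 0 = (M.take k).sum := by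
  rw [PySem.List.pyGetD_natCast, preList, PySem.List.getD_map_range _ _ _ _ (by omega)]

lemma foldl_run (g : Int → Int) (js : List Int) (acc : List Int) (r : Int) :
    (js.foldl (fun (p : List Int × Int) j => (p.1 ++ [p.2 + g j], p.2 + g j)) (acc, r)).1
      = acc ++ runL g r js := by
  induction js generalizing acc r with
  | nil => simp [runL]
  | cons j js ih => simp [runL, ih]

lemma runL_shift (g : Int → Int) (r s : Int) (js : List Int) :
    runL g (r + s) js = (runL g s js).map (r + ·) := by
  induction js generalizing s with
  | nil => simp [runL]
  | cons j js ih => simp [runL, add_assoc, ih (s + g j)]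

-- the window running sums starting at k are exactly A's prefix differences shifted by the start value
lemma runL_key (M : List Int) (k : Nat) (h : k ≤ M.length) :
    runL (fun j => PySem.List.pyGetD M j 0) ((M.take k).sum)
        (PySem.List.pyRange (k : Int) (M.length : Int))
      = (PySem.List.pyRange ((k : Int) + 1) ((M.length : Int) + 1)).map
          (fun j => PySem.List.pyGetD (preList M) j 0) := by
  induction hd : M.length - k generalizing k with
  | zero =>
    have hk : k = M.length := by omega
    subst hk
    simp [PySem.List.pyRange, runL]
  | succ d ih =>
    have hklt : k < M.length := by omega
    rw [PySem.List.pyRange_one_cons (by exact_mod_cast hklt)]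
    rw [show ((k : Int) + 1) = ((k + 1 : Nat) : Int) by push_cast; ring]
    simp only [runL]
    have hrec : (M.take k).sum + PySem.List.pyGetD M (k : Int) 0 = (M.take (k+1)).sum := by
      rw [PySem.List.pyGetD_natCast, List.getD_eq_getElem _ _ hklt, List.sum_take_succ _ _ hklt]
    rw [hrec, ih (k+1) (by omega) (by omega)]
    rw [PySem.List.pyRange_one_cons (a := ((k+1 : Nat):Int)) (by push_cast; omega),
      List.map_cons, preD M (k+1) (by omega)]

lemma insert_items_ne_nil (d : PySem.Dict Int Int) (k v : Int) :
    (d.insert k v).items ≠ [] := by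
  rw [PySem.Dict.items_insert]
  split_ifs with h
  · intro hnil
    simp only [List.map_eq_nil_iff] at hnil
    rw [PySem.Dict.contains_iff_mem_keys] at h
    simp [PySem.Dict.keys, hnil] at h
  · simp

lemma foldl_ite_insert_ne_nil (f : Int × Int → Int) (l : List (Int × Int)) (d : PySem.Dict Int Int)
    (hd : d.items ≠ []) :
    (l.foldl (fun d kv => if 0 < f kv then d.insert kv.1 (f kv) else d) d).items ≠ [] := by
  induction l generalizing d with
  | nil => simpa
  | cons kv l ih =>
    simp only [List.foldl_cons]
    split_ifs with h
    · exact ih _ (insert_items_ne_nil d kv.1 (f kv))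
    · exact ih _ hd

-- B's Counter-subtraction loop yields an empty dict iff no positive difference occurs
lemma foldl_ite_insert_items_nil (f : Int × Int → Int) (l : List (Int × Int)) (d : PySem.Dict Int Int) :
    ((l.foldl (fun d kv => if 0 < f kv then d.insert kv.1 (f kv) else d) d).items = [])
      ↔ (d.items = [] ∧ ∀ kv ∈ l, ¬ 0 < f kv) := by
  induction l generalizing d with
  | nil => simp
  | cons kv l ih =>
    simp only [List.foldl_cons, List.mem_cons]
    split_ifs with h
    · constructor
      · intro hnil
        exact absurd hnil (foldl_ite_insert_ne_nil f l _ (insert_items_ne_nil d kv.1 (f kv)))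
      · rintro ⟨-, hall⟩
        exact absurd h (hall kv (Or.inl rfl))
    · rw [ih]
      constructor
      · rintro ⟨h1, h2⟩
        exact ⟨h1, fun x hx => hx.elim (fun he => he ▸ h) (h2 x)⟩
      · rintro ⟨h1, h2⟩
        exact ⟨h1, fun x hx => h2 x (Or.inr hx)⟩

-- the unsorted generated lists of A and B coincide
lemma gen_eq (peptide : String) :
    (PySem.List.pyRange 0 (PySem.Str.len peptide)).foldl
      (fun sp i => (PySem.List.pyRange (i+1) (PySem.Str.len peptide + 1)).foldl
        (fun sp j => sp ++
          [PySem.List.pyGetD (peptide.toList.foldl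
              (fun pm m => pm ++ [PySem.List.pyGetD pm (-1) 0 + AminoAcidMass.getD m 0]) [0]) j 0
           - PySem.List.pyGetD (peptide.toList.foldl
              (fun pm m => pm ++ [PySem.List.pyGetD pm (-1) 0 + AminoAcidMass.getD m 0]) [0]) i 0]) sp)
      [0]
    = (PySem.List.pyRange 0 (PySem.List.len (peptide.toList.map (fun c => AminoAcidMass.getD c 0)))).foldl
        (fun sb i =>
          ((PySem.List.pyRange i (PySem.List.len (peptide.toList.map (fun c => AminoAcidMass.getD c 0)))).foldl
            (fun (p : List Int × Int) j =>
              (p.1 ++ [p.2 + PySem.List.pyGetD (peptide.toList.map (fun c => AminoAcidMass.getD c 0)) j 0],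
               p.2 + PySem.List.pyGetD (peptide.toList.map (fun c => AminoAcidMass.getD c 0)) j 0)) (sb, 0)).1)
        [0] := by
  have hM : PySem.List.len (peptide.toList.map (fun c => AminoAcidMass.getD c 0))
      = ((peptide.toList.map (fun c => AminoAcidMass.getD c 0)).length : Int) := PySem.List.len_eq _
  have hlen : PySem.Str.len peptide = ((peptide.toList.map (fun c => AminoAcidMass.getD c 0)).length : Int) := by
    rw [PySem.Str.len_eq]; simp
  rw [hM, hlen, prefix_eq]
  generalize hMdef : peptide.toList.map (fun c => AminoAcidMass.getD c 0) = M
  -- A's side: inner loop is an append-of-singletons loop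
  rw [PySem.List.foldl_congr_mem _ _
    (fun sp i => sp ++ (PySem.List.pyRange (i+1) ((M.length : Int)+1)).map
      (fun j => PySem.List.pyGetD (preList M) j 0 - PySem.List.pyGetD (preList M) i 0)) _
    (fun acc x _ => PySem.List.foldl_append_singleton_eq_map _ _ _)]
  rw [PySem.List.foldl_append_eq_flatMap]
  -- B's side: inner loop is the running-sum loop
  rw [PySem.List.foldl_congr_mem _ _
    (fun sb i => sb ++ runL (fun j => PySem.List.pyGetD M j 0) 0 (PySem.List.pyRange i (M.length : Int))) _
    (fun acc x _ => foldl_run _ _ _ _)]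
  rw [PySem.List.foldl_append_eq_flatMap]
  refine congrArg _ ?_
  apply List.flatMap_congr
  intro i hi
  rw [PySem.List.mem_pyRange_one] at hi
  obtain ⟨ki, rfl⟩ := Int.eq_ofNat_of_zero_le hi.1
  have hk : ki ≤ M.length := by exact_mod_cast hi.2.le
  have hsplit : runL (fun j => PySem.List.pyGetD M j 0) 0 (PySem.List.pyRange (ki:Int) (M.length:Int))
      = (runL (fun j => PySem.List.pyGetD M j 0) ((M.take ki).sum)
          (PySem.List.pyRange (ki:Int) (M.length:Int))).map (fun x => -((M.take ki).sum) + x) := by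
    rw [← runL_shift]
    norm_num
  rw [hsplit, runL_key M ki hk, List.map_map]
  apply List.map_congr_left
  intro j _
  rw [Function.comp_apply, preD M ki hk]
  ring

-- the two containment checks agree once the generated lists agree up to order
lemma bridge (L spec : List Int) :
    ((PySem.Dict.counter (PySem.List.sorted L (fun x => x) false)).keys.all
       (fun mass => !(decide ((PySem.Dict.counter spec).getD mass 0
          < (PySem.Dict.counter (PySem.List.sorted L (fun x => x) false)).getD mass 0))))
    = decide (((PySem.Dict.counter L).items.foldl
        (fun d kv => if 0 < kv.2 - (PySem.Dict.counter spec).getD kv.1 0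
          then d.insert kv.1 (kv.2 - (PySem.Dict.counter spec).getD kv.1 0) else d)
        PySem.Dict.empty).items = []) := by
  have hc : ∀ m : Int, List.count m (PySem.List.sorted L (fun x => x) false) = List.count m L :=
    fun m => (PySem.List.sorted_perm L _ false).count_eq m
  rw [Bool.eq_iff_iff]
  simp only [foldl_ite_insert_items_nil (fun kv => kv.2 - (PySem.Dict.counter spec).getD kv.1 0)]
  simp only [List.all_eq_true, Bool.not_eq_true', decide_eq_false_iff_not, decide_eq_true_eq,
    PySem.Dict.keys_counter, PySem.Dict.getD_counter, PySem.Dict.items_counter,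
    PySem.Set.mem_ofList, PySem.List.mem_sorted, List.mem_map, not_lt, hc]
  constructor
  · intro h
    refine ⟨by simp [PySem.Dict.empty], ?_⟩
    rintro kv ⟨k, hk, rfl⟩
    have := h k hk
    simp only []
    omega
  · rintro ⟨-, h⟩
    intro m hm
    have := h (m, (List.count m L : Int)) ⟨m, hm, rfl⟩
    simp only [] at this
    omega

-- ===== VERDICT (by name: the statement is the Claim_ definition above) =====
theorem Consistent_spec : Claim_equal_Consistent := by
  intro peptide spectrum _ _
  unfold Spec_Consistent
  simp only [Consistent, Consistent_alt, linear_spectrum]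
  simp only [gen_eq peptide]
  exact bridge _ spectrum
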